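-- pv_equiv track=rewrite | github.com/AdamEzzat1/gibran | src/gibran/execution/engines/postgres.py | translate_qmark_placeholders
-- ===== SOURCE A (Python) =====
-- def translate_qmark_placeholders(sql: str) -> str:
--     """Translate DuckDB-style `?` placeholders to psycopg `%s`.
--
--     Also doubles every literal `%` to `%%`. psycopg's parameter
--     substitution treats `%` as a format directive and requires
--     doubling regardless of whether the `%` appears inside a string
--     literal -- a `LIKE 'a%b'` would otherwise be misparsed.
--
--     Walks the SQL string with a tiny state machine that tracks whether
--     we're inside a single-quoted string literal, a double-quoted
--     identifier, or a `--` line comment. `?` is only replaced outside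
--     those scopes (a literal `?` in `WHERE name = 'who?'` is part of
--     the value, not a placeholder).
--
--     Limitations:
--       - Doesn't handle dollar-quoted strings ($$ ... $$). Internal
--         gibran SQL doesn't use them. If a future caller needs them,
--         extend this function.
--       - The `%%` doubling is applied EVERYWHERE (even inside comments)
--         because we don't track whether the SQL will later be passed
--         through psycopg's parameter substitution. Over-doubling in a
--         comment is harmless.
--     """
--     out: list[str] = []
--     i = 0
--     n = len(sql)
--     in_single = False
--     in_double = False
--     in_line_comment = False
--     while i < n:
--         c = sql[i]
--         # `%` -> `%%` everywhere (psycopg parameter substitution).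
--         # Must be handled first so it applies inside string literals too.
--         if c == "%":
--             out.append("%%")
--             i += 1
--             continue
--         # `?` -> `%s` ONLY outside literals / comments (a literal `?`
--         # inside `'who?'` is part of the value, not a placeholder).
--         if c == "?" and not (in_single or in_double or in_line_comment):
--             out.append("%s")
--             i += 1
--             continue
--         # Otherwise: track state and pass character through.
--         if in_line_comment:
--             out.append(c)
--             if c == "\n":
--                 in_line_comment = False
--         elif in_single:
--             out.append(c)
--             if c == "'":
--                 # `''` is an escaped single quote inside the literal,
--                 # not the literal's terminator.
--                 if i + 1 < n and sql[i + 1] == "'":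
--                     out.append("'")
--                     i += 2
--                     continue
--                 in_single = False
--         elif in_double:
--             out.append(c)
--             if c == '"':
--                 in_double = False
--         elif c == "'":
--             out.append(c)
--             in_single = True
--         elif c == '"':
--             out.append(c)
--             in_double = True
--         elif c == "-" and i + 1 < n and sql[i + 1] == "-":
--             out.append("--")
--             i += 2
--             in_line_comment = True
--             continue
--         else:
--             out.append(c)
--         i += 1
--     return "".join(out)
-- ===== SOURCE B (Python) =====
-- def _double_percent(s: str) -> str:
--     return "".join("%%" if ch == "%" else ch for ch in s)
--
--
-- def _end_of_single(sql: str, j: int) -> int: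
--     """Index just past the end of a single-quoted literal body starting at j
--     (opening quote already consumed); '' is an escaped quote."""
--     n = len(sql)
--     while j < n:
--         if sql[j] == "'":
--             if sql[j + 1 : j + 2] == "'":
--                 j += 2
--             else:
--                 return j + 1
--         else:
--             j += 1
--     return n
--
--
-- def _end_past(sql: str, j: int, stop: str) -> int:
--     """Index just past the first occurrence of `stop` at or after j (or end)."""
--     n = len(sql)
--     while j < n:
--         if sql[j] == stop:
--             return j + 1
--         j += 1
--     return n
--
--
-- def translate_qmark_placeholders(sql: str) -> str:
--     """Tokenizer: consume whole quoted literals / identifiers / line comments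
--     as chunks (doubling % inside), and replace ? / % only between chunks."""
--     out = []
--     i = 0
--     n = len(sql)
--     while i < n:
--         c = sql[i]
--         if c == "'":
--             j = _end_of_single(sql, i + 1)
--             out.append(_double_percent(sql[i:j]))
--             i = j
--         elif c == '"':
--             j = _end_past(sql, i + 1, '"')
--             out.append(_double_percent(sql[i:j]))
--             i = j
--         elif c == "-" and sql.startswith("--", i):
--             j = _end_past(sql, i + 2, "\n")
--             out.append(_double_percent(sql[i:j]))
--             i = j
--         elif c == "?":
--             out.append("%s")
--             i += 1
--         elif c == "%":
--             out.append("%%")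
--             i += 1
--         else:
--             out.append(c)
--             i += 1
--     return "".join(out)
-- ===== Notes on version B (the rewrite author's own statement) =====
-- stated objective: alternative
-- what changed: Replaces A's per-character loop with three boolean state flags by a tokenizer that consumes whole single-quoted literals, double-quoted identifiers and -- line comments as chunks (doubling % inside the chunk), replacing ? and % only between chunks.
import Mathlib
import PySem

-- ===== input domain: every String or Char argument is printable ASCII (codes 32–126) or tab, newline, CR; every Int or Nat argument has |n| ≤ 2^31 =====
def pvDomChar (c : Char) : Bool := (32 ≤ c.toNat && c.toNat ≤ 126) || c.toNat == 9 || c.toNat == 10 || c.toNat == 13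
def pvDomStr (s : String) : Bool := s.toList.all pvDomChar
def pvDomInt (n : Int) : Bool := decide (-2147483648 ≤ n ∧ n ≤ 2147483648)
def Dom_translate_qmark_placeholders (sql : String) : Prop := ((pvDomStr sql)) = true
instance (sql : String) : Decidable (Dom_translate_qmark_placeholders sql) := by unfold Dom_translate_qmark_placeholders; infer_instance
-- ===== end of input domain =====

-- B replaces A's per-character three-flag state machine by a tokenizer that consumes
-- whole quoted literals / identifiers / line comments as chunks (objective: alternative).

-- ===== PORT A =====
-- A's while-loop with index i and flags in_single/in_double/in_line_comment,
-- transliterated as recursion over the remaining characters with the same flags.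
def pvGoA : List Char → Bool → Bool → Bool → List Char
  | [], _, _, _ => []
  | c :: rest, s, d, lc =>
    if c = '%' then '%' :: '%' :: pvGoA rest s d lc
    else if c = '?' ∧ (s || d || lc) = false then '%' :: 's' :: pvGoA rest s d lc
    else if lc = true then c :: pvGoA rest s d (if c = '\n' then false else lc)
    else if s = true then
      if c = '\'' then
        if rest.head? = some '\'' then c :: '\'' :: pvGoA rest.tail s d lc
        else c :: pvGoA rest false d lc
      else c :: pvGoA rest s d lc
    else if d = true then c :: pvGoA rest s (if c = '"' then false else d) lc
    else if c = '\'' then c :: pvGoA rest true d lc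
    else if c = '"' then c :: pvGoA rest s true lc
    else if c = '-' ∧ rest.head? = some '-' then c :: '-' :: pvGoA rest.tail s d true
    else c :: pvGoA rest s d lc
  termination_by xs _ _ _ => xs.length
  decreasing_by all_goals simp_all [List.length_tail]

def translate_qmark_placeholders (sql : String) : String :=
  String.mk (pvGoA sql.toList false false false)

-- ===== PORT B =====
-- _double_percent: "".join("%%" if ch == "%" else ch for ch in s)
def pvDbl (l : List Char) : List Char :=
  l.flatMap (fun ch => if ch = '%' then ['%', '%'] else [ch])

-- _end_of_single: splits the body of a single-quoted literal (after the opening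
-- quote) from the remainder; '' is an escaped quote.
def pvSpanSingle : List Char → List Char × List Char
  | [] => ([], [])
  | '\'' :: '\'' :: rest =>
      let p := pvSpanSingle rest
      ('\'' :: '\'' :: p.1, p.2)
  | '\'' :: rest => (['\''], rest)
  | c :: rest =>
      let p := pvSpanSingle rest
      (c :: p.1, p.2)

-- _end_past: splits everything up to and including the first `stop` from the remainder.
def pvSpanUntil (stop : Char) : List Char → List Char × List Char
  | [] => ([], [])
  | c :: rest =>
    if c = stop then ([c], rest)
    else
      let p := pvSpanUntil stop rest
      (c :: p.1, p.2)

theorem pvSpanSingle_snd_le (xs : List Char) : (pvSpanSingle xs).2.length ≤ xs.length := by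
  induction xs using pvSpanSingle.induct <;> simp_all [pvSpanSingle] <;> omega

theorem pvSpanUntil_snd_le (stop : Char) (xs : List Char) :
    (pvSpanUntil stop xs).2.length ≤ xs.length := by
  induction xs using pvSpanUntil.induct stop <;> simp_all [pvSpanUntil] <;> omega

-- B's main loop: chunk at quotes / comment starts, otherwise single characters.
def pvGoB : List Char → List Char
  | [] => []
  | c :: rest =>
    if c = '\'' then
      pvDbl (c :: (pvSpanSingle rest).1) ++ pvGoB (pvSpanSingle rest).2
    else if c = '"' then
      pvDbl (c :: (pvSpanUntil '"' rest).1) ++ pvGoB (pvSpanUntil '"' rest).2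
    else if c = '-' ∧ rest.head? = some '-' then
      pvDbl (c :: '-' :: (pvSpanUntil '\n' rest.tail).1) ++ pvGoB (pvSpanUntil '\n' rest.tail).2
    else if c = '?' then '%' :: 's' :: pvGoB rest
    else if c = '%' then '%' :: '%' :: pvGoB rest
    else c :: pvGoB rest
  termination_by xs => xs.length
  decreasing_by
  · have := pvSpanSingle_snd_le rest; simp; omega
  · have := pvSpanUntil_snd_le '"' rest; simp; omega
  · have := pvSpanUntil_snd_le '\n' rest.tail; simp [List.length_tail] at *; omega
  · simp
  · simp
  · simp

def translate_qmark_placeholders_alt (sql : String) : String :=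
  String.mk (pvGoB sql.toList)

-- ===== PRECONDITION & SPEC =====
def Spec_translate_qmark_placeholders (sql : String) (out : String) : Prop := out = translate_qmark_placeholders_alt sql
instance (sql : String) (out : String) : Decidable (Spec_translate_qmark_placeholders sql out) := by unfold Spec_translate_qmark_placeholders; infer_instance

-- ===== CLAIM (what is proved, stated in full; the proofs are below) =====
def Claim_equal_translate_qmark_placeholders : Prop := ∀ (sql : String), Dom_translate_qmark_placeholders sql → Spec_translate_qmark_placeholders sql (translate_qmark_placeholders sql)

-- ===== LEMMAS AND PROOFS =====

theorem pvGoA_single (xs : List Char) :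
    pvGoA xs true false false =
      pvDbl (pvSpanSingle xs).1 ++ pvGoA (pvSpanSingle xs).2 false false false := by
  induction xs using pvSpanSingle.induct with
  | case1 => simp [pvGoA, pvSpanSingle, pvDbl]
  | case2 rest ih => simp_all [pvGoA, pvSpanSingle, pvDbl]
  | case3 rest h =>
      simp_all [pvGoA, pvSpanSingle, pvDbl]
      intro hh
      cases rest <;> simp_all
  | case4 c rest h1 h2 ih =>
      simp_all [pvGoA, pvSpanSingle, pvDbl]
      split <;> simp

theorem pvGoA_double (xs : List Char) :
    pvGoA xs false true false =
      pvDbl (pvSpanUntil '"' xs).1 ++ pvGoA (pvSpanUntil '"' xs).2 false false false := by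
  induction xs using pvSpanUntil.induct '"' <;>
    simp_all [pvGoA, pvSpanUntil, pvDbl] <;> (split <;> simp)

theorem pvGoA_comment (xs : List Char) :
    pvGoA xs false false true =
      pvDbl (pvSpanUntil '\n' xs).1 ++ pvGoA (pvSpanUntil '\n' xs).2 false false false := by
  induction xs using pvSpanUntil.induct '\n' <;>
    simp_all [pvGoA, pvSpanUntil, pvDbl] <;> (split <;> simp)

theorem pvGoA_eq_pvGoB (xs : List Char) : pvGoA xs false false false = pvGoB xs := by
  induction xs using pvGoB.induct <;>
    simp_all [pvGoA, pvGoB, pvDbl, pvGoA_single, pvGoA_double, pvGoA_comment] <;>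
    (split <;> simp_all)

-- ===== VERDICT (by name: the statement is the Claim_ definition above) =====
theorem translate_qmark_placeholders_spec : Claim_equal_translate_qmark_placeholders := by
  intro sql _
  unfold Spec_translate_qmark_placeholders translate_qmark_placeholders translate_qmark_placeholders_alt
  simp [pvGoA_eq_pvGoB]
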